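-- pv_equiv track=rewrite | github.com/elkhaligy/LeetCode | 3. Hard/(8) Aug 2024/Week 3/1. 664. Strange Printer/664. Strange Printer.py | strangePrinter_top_down
-- ===== SOURCE A (Python) =====
-- def strangePrinter_top_down(s: str) -> int:
--
--     """This function takes a string, start index and end index then returns the number of turns needed to print this string
--     Args:
--         string (str): The string to operate on
--         start (int): Starting index
--         end (int): Ending index
--     Returns:
--         int: Minimum number of turns to print that string
--     """
--     def minimum_turns(string: str, start: int, end: int) -> int:
--         if start > end:
--             return 0
--         min_turns = 1 + minimum_turns(string, start + 1, end)
--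
--         for i in range(start + 1, end + 1):
--             if string[i] == string[start]:
--                 turns_with_match = minimum_turns(string, start, i - 1) + minimum_turns(string, i + 1, end)
--                 min_turns = min(min_turns, turns_with_match)
--
--         return min_turns
--
--     return minimum_turns(s, 0, len(s) - 1)
-- ===== SOURCE B (Python) =====
-- def strangePrinter_top_down(s: str) -> int:
--     memo = {}
--
--     def turns(i: int, j: int) -> int:
--         if i > j:
--             return 0
--         if (i, j) in memo:
--             return memo[(i, j)]
--         best = 1 + turns(i + 1, j)
--         for k in range(i + 1, j + 1):
--             if s[k] == s[i]:
--                 best = min(best, turns(i, k - 1) + turns(k + 1, j))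
--         memo[(i, j)] = best
--         return best
--
--     return turns(0, len(s) - 1)
-- ===== Notes on version B (the rewrite author's own statement) =====
-- stated objective: faster
-- what changed: Replaces the naive exponential interval recursion with dynamic programming: the same (start,end) recurrence memoized in a dict, so each interval is solved once; intended as faster (timing: 7.89x at n=16, the largest size both finished; A timed out at n=64 where B returned).
import Mathlib
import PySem

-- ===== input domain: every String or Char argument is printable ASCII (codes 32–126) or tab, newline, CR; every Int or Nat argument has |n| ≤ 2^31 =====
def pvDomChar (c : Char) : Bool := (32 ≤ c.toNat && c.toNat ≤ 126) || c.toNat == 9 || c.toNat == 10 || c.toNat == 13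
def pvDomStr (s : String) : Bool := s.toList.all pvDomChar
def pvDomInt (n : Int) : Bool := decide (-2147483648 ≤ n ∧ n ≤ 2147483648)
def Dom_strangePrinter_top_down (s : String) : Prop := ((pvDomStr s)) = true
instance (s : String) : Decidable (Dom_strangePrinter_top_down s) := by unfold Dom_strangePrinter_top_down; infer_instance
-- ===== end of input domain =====

-- B memoizes A's (start,end) recurrence in a dict (dynamic programming) instead of recomputing it; same result.

-- ===== PORT A =====
-- literal port of A's nested `minimum_turns`: the `for i in range(start+1, end+1)` loop is a fold over pyRange,
-- string[i] is PySem.List.pyGet? (always in range on the reachable calls); `fuel` is purely a totality guard —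
-- recursion depth is bounded by the interval length, so the top-level fuel `cs.length` is never exhausted.
def pvA_min (cs : List Char) (fuel : Nat) (a b : Int) : Int :=
  match fuel with
  | 0 => 0
  | f + 1 =>
    if a > b then 0
    else
      (PySem.List.pyRange (a + 1) (b + 1) 1).foldl
        (fun cur i =>
          if PySem.List.pyGet? cs i = PySem.List.pyGet? cs a then
            min cur (pvA_min cs f a (i - 1) + pvA_min cs f (i + 1) b)
          else cur)
        (1 + pvA_min cs f (a + 1) b)

def strangePrinter_top_down (s : String) : Int :=
  pvA_min s.toList s.toList.length 0 ((s.toList.length : Int) - 1)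

-- ===== PORT B =====
-- literal port of Source B: the same recursion threading the memo dict through every call
-- (loop = fold over pyRange carrying (best, memo); fuel again only a totality guard, never exhausted)
def pvB_turns (cs : List Char) (fuel : Nat) (i j : Int)
    (m : PySem.Dict (Int × Int) Int) : Int × PySem.Dict (Int × Int) Int :=
  match fuel with
  | 0 => (0, m)
  | f + 1 =>
    if i > j then (0, m)
    else
      match m.get? (i, j) with
      | some v => (v, m)
      | none =>
        let r := pvB_turns cs f (i + 1) j m
        let res := (PySem.List.pyRange (i + 1) (j + 1) 1).foldl
          (fun bm k =>
            if PySem.List.pyGet? cs k = PySem.List.pyGet? cs i then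
              let l := pvB_turns cs f i (k - 1) bm.2
              let rr := pvB_turns cs f (k + 1) j l.2
              (min bm.1 (l.1 + rr.1), rr.2)
            else bm)
          (1 + r.1, r.2)
        (res.1, res.2.insert (i, j) res.1)

def strangePrinter_top_down_alt (s : String) : Int :=
  (pvB_turns s.toList s.toList.length 0 ((s.toList.length : Int) - 1) PySem.Dict.empty).1

-- ===== PRECONDITION & SPEC =====
def Spec_strangePrinter_top_down (s : String) (out : Int) : Prop := out = strangePrinter_top_down_alt s
instance (s : String) (out : Int) : Decidable (Spec_strangePrinter_top_down s out) := by unfold Spec_strangePrinter_top_down; infer_instance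

-- ===== CLAIM (what is proved, stated in full; the proofs are below) =====
def Claim_equal_strangePrinter_top_down : Prop := ∀ (s : String), Dom_strangePrinter_top_down s → Spec_strangePrinter_top_down s (strangePrinter_top_down s)

-- ===== LEMMAS AND PROOFS =====

-- A's value on an interval, computed with exactly enough fuel
def pvVal (cs : List Char) (a b : Int) : Int := pvA_min cs (b - a + 1).toNat a b

-- memo invariant: every cached value is A's value on that interval
def pvInv (cs : List Char) (m : PySem.Dict (Int × Int) Int) : Prop :=
  ∀ p v, m.get? p = some v → v = pvVal cs p.1 p.2

lemma pvA_min_of_gt (cs : List Char) (fuel : Nat) (a b : Int) (h : a > b) :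
    pvA_min cs fuel a b = 0 := by
  cases fuel <;> simp [pvA_min, h]

-- fuel irrelevance: any fuel ≥ the interval length computes the same value
lemma pvA_irrel : ∀ (n : Nat) (cs : List Char) (f g : Nat) (a b : Int),
    (b - a + 1).toNat ≤ n → b - a + 1 ≤ (f : Int) → b - a + 1 ≤ (g : Int) →
    pvA_min cs f a b = pvA_min cs g a b := by
  intro n
  induction n with
  | zero =>
    intro cs f g a b hn _ _
    have hab : a > b := by omega
    rw [pvA_min_of_gt cs f a b hab, pvA_min_of_gt cs g a b hab]
  | succ n IH =>
    intro cs f g a b hn hf hg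
    by_cases hab : a > b
    · rw [pvA_min_of_gt cs f a b hab, pvA_min_of_gt cs g a b hab]
    · obtain ⟨f', rfl⟩ : ∃ f', f = f' + 1 := ⟨f - 1, by omega⟩
      obtain ⟨g', rfl⟩ : ∃ g', g = g' + 1 := ⟨g - 1, by omega⟩
      simp only [pvA_min, hab, if_false]
      rw [IH cs f' g' (a + 1) b (by omega) (by omega) (by omega)]
      apply PySem.List.foldl_congr_mem
      intro cur k hk
      rw [PySem.List.mem_pyRange_one] at hk
      rw [IH cs f' g' a (k - 1) (by omega) (by omega) (by omega),
        IH cs f' g' (k + 1) b (by omega) (by omega) (by omega)]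

lemma pvA_eq_val (cs : List Char) (f : Nat) (a b : Int) (hf : b - a + 1 ≤ (f : Int)) :
    pvA_min cs f a b = pvVal cs a b :=
  pvA_irrel ((b - a + 1).toNat) cs f ((b - a + 1).toNat) a b le_rfl hf (by omega)

lemma pvB_correct : ∀ (n : Nat) (cs : List Char) (f : Nat) (i j : Int)
    (m : PySem.Dict (Int × Int) Int), (j - i + 2).toNat ≤ n → j - i + 1 ≤ (f : Int) →
    pvInv cs m →
    (pvB_turns cs f i j m).1 = pvVal cs i j ∧ pvInv cs (pvB_turns cs f i j m).2 := by
  intro n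
  induction n using Nat.strong_induction_on with
  | _ n IH =>
    intro cs f i j m hn hf hInv
    by_cases hij : i > j
    · have hA : pvVal cs i j = 0 := pvA_min_of_gt cs _ i j hij
      cases f <;> simp [pvB_turns, hij, hA, hInv]
    · obtain ⟨f', rfl⟩ : ∃ f', f = f' + 1 := ⟨f - 1, by omega⟩
      simp only [pvB_turns, hij, if_false]
      cases hget : m.get? (i, j) with
      | some v =>
        exact ⟨by simpa using hInv (i, j) v hget, hInv⟩
      | none =>
        simp only
        have hf' : (f' : Int) ≥ j - i := by omega
        have hr := IH (n - 1) (by omega) cs f' (i + 1) j m (by omega) (by omega) hInv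
        -- B's fold agrees (in its first component) with the pvVal-form of A's loop body,
        -- and preserves the memo invariant
        have hfold : ∀ (l : List Int), (∀ k ∈ l, i + 1 ≤ k ∧ k ≤ j) →
            ∀ (cur : Int) (m' : PySem.Dict (Int × Int) Int), pvInv cs m' →
            (l.foldl (fun bm k =>
              if PySem.List.pyGet? cs k = PySem.List.pyGet? cs i then
                ((min bm.1 ((pvB_turns cs f' i (k - 1) bm.2).1 +
                  (pvB_turns cs f' (k + 1) j (pvB_turns cs f' i (k - 1) bm.2).2).1)),
                  (pvB_turns cs f' (k + 1) j (pvB_turns cs f' i (k - 1) bm.2).2).2)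
              else bm) (cur, m')).1 =
              l.foldl (fun cur k =>
                if PySem.List.pyGet? cs k = PySem.List.pyGet? cs i then
                  min cur (pvVal cs i (k - 1) + pvVal cs (k + 1) j)
                else cur) cur ∧
            pvInv cs (l.foldl (fun bm k =>
              if PySem.List.pyGet? cs k = PySem.List.pyGet? cs i then
                ((min bm.1 ((pvB_turns cs f' i (k - 1) bm.2).1 +
                  (pvB_turns cs f' (k + 1) j (pvB_turns cs f' i (k - 1) bm.2).2).1)),
                  (pvB_turns cs f' (k + 1) j (pvB_turns cs f' i (k - 1) bm.2).2).2)
              else bm) (cur, m')).2 := by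
          intro l
          induction l with
          | nil => intro _ cur m' h'; exact ⟨rfl, h'⟩
          | cons k l ihl =>
            intro hb cur m' hInv'
            obtain ⟨hk1, hk2⟩ := hb k (List.mem_cons_self ..)
            have hbl : ∀ k' ∈ l, i + 1 ≤ k' ∧ k' ≤ j :=
              fun k' hk' => hb k' (List.mem_cons_of_mem _ hk')
            by_cases hc : PySem.List.pyGet? cs k = PySem.List.pyGet? cs i
            · have hl := IH (n - 1) (by omega) cs f' i (k - 1) m' (by omega) (by omega) hInv'
              have hrr := IH (n - 1) (by omega) cs f' (k + 1) j
                (pvB_turns cs f' i (k - 1) m').2 (by omega) (by omega) hl.2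
              simp only [List.foldl_cons, hc, if_true]
              rw [hl.1, hrr.1]
              exact ihl hbl _ _ hrr.2
            · simp only [List.foldl_cons, hc, if_false]
              exact ihl hbl cur m' hInv'
        have hres := hfold (PySem.List.pyRange (i + 1) (j + 1) 1)
          (fun k hk => by rw [PySem.List.mem_pyRange_one] at hk; omega)
          (1 + (pvB_turns cs f' (i + 1) j m).1) (pvB_turns cs f' (i + 1) j m).2 hr.2
        -- A's value, unfolded once and rewritten to pvVal form
        have hA : pvVal cs i j =
            (PySem.List.pyRange (i + 1) (j + 1) 1).foldl
              (fun cur k =>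
                if PySem.List.pyGet? cs k = PySem.List.pyGet? cs i then
                  min cur (pvVal cs i (k - 1) + pvVal cs (k + 1) j)
                else cur) (1 + pvVal cs (i + 1) j) := by
          have hsucc : (j - i + 1).toNat = (j - i).toNat + 1 := by omega
          rw [pvVal, hsucc]
          simp only [pvA_min, hij, if_false]
          rw [pvA_eq_val cs ((j - i).toNat) (i + 1) j (by omega)]
          apply PySem.List.foldl_congr_mem
          intro cur k hk
          rw [PySem.List.mem_pyRange_one] at hk
          rw [pvA_eq_val cs ((j - i).toNat) i (k - 1) (by omega),
            pvA_eq_val cs ((j - i).toNat) (k + 1) j (by omega)]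
        have hval : ((PySem.List.pyRange (i + 1) (j + 1) 1).foldl
            (fun bm k =>
              if PySem.List.pyGet? cs k = PySem.List.pyGet? cs i then
                ((min bm.1 ((pvB_turns cs f' i (k - 1) bm.2).1 +
                  (pvB_turns cs f' (k + 1) j (pvB_turns cs f' i (k - 1) bm.2).2).1)),
                  (pvB_turns cs f' (k + 1) j (pvB_turns cs f' i (k - 1) bm.2).2).2)
              else bm)
            (1 + (pvB_turns cs f' (i + 1) j m).1, (pvB_turns cs f' (i + 1) j m).2)).1 =
            pvVal cs i j := by
          rw [hres.1, hr.1, hA]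
        refine ⟨hval, ?_⟩
        intro p v hpv
        rw [PySem.Dict.get?_insert] at hpv
        rcases Decidable.em (p = (i, j)) with hp | hp
        · rw [if_pos hp] at hpv
          injection hpv with h2
          subst hp
          rw [← h2]
          simpa using hval
        · rw [if_neg hp] at hpv
          exact hres.2 p v hpv

-- ===== VERDICT (by name: the statement is the Claim_ definition above) =====
theorem strangePrinter_top_down_spec : Claim_equal_strangePrinter_top_down := by
  intro s _
  unfold Spec_strangePrinter_top_down strangePrinter_top_down strangePrinter_top_down_alt
  have h := pvB_correct (((s.toList.length : Int) + 1).toNat) s.toList s.toList.length 0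
    ((s.toList.length : Int) - 1) PySem.Dict.empty (by omega) (by omega)
    (by intro p v h; simp [PySem.Dict.get?_empty] at h)
  rw [h.1, pvVal, pvA_eq_val s.toList s.toList.length 0 ((s.toList.length : Int) - 1) (by omega),
    pvVal]
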